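-- pv_equiv track=rewrite | github.com/Dgawel77/Advent-Of-Code | 2020/Days/Day18-1.py | findset
-- ===== SOURCE A (Python) =====
-- def findset(line):
--     firstParen = -1
--     for char in enumerate(line):
--         if char[1] == "(":
--             firstParen = char[0]
--         elif char[1] == ")":
--             return(firstParen, char[0])
--     return (-1, -1)
-- ===== SOURCE B (Python) =====
-- def findset(line):
--     # Split-based: cut the string at the first ')'; the close index is the
--     # length of the piece before it.  Split that piece on '('; the open index
--     # is recovered arithmetically from the length of the last segment.
--     parts = line.split(')', 1)
--     if len(parts) == 1:
--         return (-1, -1)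
--     head = parts[0]
--     segs = head.split('(')
--     close = len(head)
--     if len(segs) == 1:
--         return (-1, close)
--     return (close - len(segs[-1]) - 1, close)
-- ===== Notes on version B (the rewrite author's own statement) =====
-- stated objective: faster
-- what changed: Replaced A's stateful indexed forward scan with a split-based decomposition: split once on the close paren to get the prefix (whose length is the close index), split that prefix on the open paren and recover the open index arithmetically from the length of the last segment - no per-character Python loop or index tracking at all.
import Mathlib
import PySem

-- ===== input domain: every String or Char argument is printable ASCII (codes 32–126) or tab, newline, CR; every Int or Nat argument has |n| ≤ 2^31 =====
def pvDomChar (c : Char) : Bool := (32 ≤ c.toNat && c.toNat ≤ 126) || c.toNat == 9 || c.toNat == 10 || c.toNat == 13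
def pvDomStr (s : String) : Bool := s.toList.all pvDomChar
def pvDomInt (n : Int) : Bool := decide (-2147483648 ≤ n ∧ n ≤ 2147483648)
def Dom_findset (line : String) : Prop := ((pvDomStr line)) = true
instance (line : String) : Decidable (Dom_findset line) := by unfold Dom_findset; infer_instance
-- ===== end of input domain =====

-- B replaces A's stateful indexed forward scan with a split-based decomposition:
-- split once on ')' and once on '(' and compute both indices from segment lengths.

-- ===== PORT A =====
-- A's for-loop over enumerate(line): counter i, state firstParen; early return at ')'.
def findsetLoop : List Char → Int → Nat → Int × Int
  | [], _fp, _i => (-1, -1)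
  | c :: rest, fp, i =>
    if c = '(' then findsetLoop rest (i : Int) (i + 1)
    else if c = ')' then (fp, (i : Int))
    else findsetLoop rest fp (i + 1)

def findset (line : String) : Int × Int := findsetLoop line.toList (-1) 0

-- ===== PORT B =====
-- line.split(')', 1): exact for the one-character separator ')' — none if ')' absent,
-- otherwise the piece before the first ')' and the piece after it.
def splitOnce : List Char → Option (List Char × List Char)
  | [] => none
  | c :: rest =>
    if c = ')' then some ([], rest)
    else (splitOnce rest).map (fun p => (c :: p.1, p.2))

-- head.split('('): exact for the one-character separator '(' — first segment plus the
-- remaining segments (so the Python list of segments is s :: ss, never empty).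
def splitOpen : List Char → List Char × List (List Char)
  | [] => ([], [])
  | c :: rest =>
    let p := splitOpen rest
    if c = '(' then ([], p.1 :: p.2) else (c :: p.1, p.2)

def findset_alt (line : String) : Int × Int :=
  match splitOnce line.toList with
  | none => (-1, -1)
  | some parts =>
    let head := parts.1
    let p := splitOpen head
    let close : Int := head.length
    if p.2.isEmpty then (-1, close)
    else (close - ((p.1 :: p.2).getLastD []).length - 1, close)

-- ===== PRECONDITION & SPEC =====
def Spec_findset (line : String) (out : Int × Int) : Prop := out = findset_alt line
instance (line : String) (out : Int × Int) : Decidable (Spec_findset line out) := by unfold Spec_findset; infer_instance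

-- ===== CLAIM (what is proved, stated in full; the proofs are below) =====
def Claim_equal_findset : Prop := ∀ (line : String), Dom_findset line → Spec_findset line (findset line)

-- ===== LEMMAS AND PROOFS =====

-- rscanOpen: specification device for "index of the last '(' in the prefix", used to
-- characterise A's loop state at the early return.
def rscanOpen : List Char → Option Nat
  | [] => none
  | c :: rest => if c = '(' then some rest.length else rscanOpen rest

-- findClose: specification device for "index of the first ')'", A's early-return point.
def findClose : List Char → Nat → Option Nat
  | [], _ => none
  | c :: rest, i => if c = ')' then some i else findClose rest (i + 1)

lemma findClose_ge : ∀ (cs : List Char) (i j : Nat), findClose cs i = some j → i ≤ j := by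
  intro cs
  induction cs with
  | nil => intro i j h; simp [findClose] at h
  | cons c rest ih =>
    intro i j h
    simp only [findClose] at h
    split at h
    · cases h; omega
    · have := ih (i + 1) j h; omega

lemma findClose_lt : ∀ (cs : List Char) (i j : Nat), findClose cs i = some j → j < i + cs.length := by
  intro cs
  induction cs with
  | nil => intro i j h; simp [findClose] at h
  | cons c rest ih =>
    intro i j h
    simp only [findClose] at h
    split at h
    · cases h; simp only [List.length_cons]; omega
    · have := ih (i + 1) j h; simp only [List.length_cons]; omega

lemma rscanOpen_append_single (xs : List Char) (c : Char) :
    rscanOpen (xs ++ [c]) =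
      if c = '(' then some (match rscanOpen xs with | some k => k + 1 | none => 0)
      else (rscanOpen xs).map (· + 1) := by
  induction xs with
  | nil => simp [rscanOpen]
  | cons x rest ih =>
    by_cases hx : x = '('
    · simp only [List.cons_append, rscanOpen, if_pos hx, List.length_append,
        List.length_cons, List.length_nil]
      split_ifs <;> simp
    · simp [rscanOpen, hx, ih]

-- A's loop characterised by the first ')' and the last '(' before it.
lemma findsetLoop_eq (cs : List Char) : ∀ (fp : Int) (i : Nat),
    findsetLoop cs fp i =
      match findClose cs i with
      | none => (-1, -1)
      | some j =>
        ((match rscanOpen ((cs.take (j - i)).reverse) with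
          | some k => ((i + k : Nat) : Int)
          | none => fp), (j : Int)) := by
  induction cs with
  | nil => intro fp i; simp [findsetLoop, findClose]
  | cons c rest ih =>
    intro fp i
    by_cases hc : c = ')'
    · simp [findsetLoop, findClose, hc, rscanOpen]
    · by_cases ho : c = '('
      · have key : findClose (c :: rest) i = findClose rest (i + 1) := by
          simp [findClose, hc]
        rw [findsetLoop, if_pos ho, ih, key]
        cases h : findClose rest (i + 1) with
        | none => rfl
        | some j =>
          have hij : i + 1 ≤ j := findClose_ge rest (i + 1) j h
          have htake : (c :: rest).take (j - i) = c :: rest.take (j - (i + 1)) := by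
            have : j - i = (j - (i + 1)) + 1 := by omega
            rw [this]; rfl
          dsimp only
          rw [htake]
          simp only [List.reverse_cons, ho, rscanOpen_append_single, if_pos]
          cases hr : rscanOpen ((rest.take (j - (i + 1))).reverse) with
          | none => simp
          | some k => simp; omega
      · have key : findClose (c :: rest) i = findClose rest (i + 1) := by
          simp [findClose, hc]
        rw [findsetLoop, if_neg ho, if_neg hc, ih, key]
        cases h : findClose rest (i + 1) with
        | none => rfl
        | some j =>
          have hij : i + 1 ≤ j := findClose_ge rest (i + 1) j h
          have htake : (c :: rest).take (j - i) = c :: rest.take (j - (i + 1)) := by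
            have : j - i = (j - (i + 1)) + 1 := by omega
            rw [this]; rfl
          dsimp only
          rw [htake]
          simp only [List.reverse_cons, rscanOpen_append_single, if_neg ho]
          cases hr : rscanOpen ((rest.take (j - (i + 1))).reverse) with
          | none => simp
          | some k => simp; omega

-- B's first split characterised by the first ')'.
lemma splitOnce_eq_findClose : ∀ (cs : List Char),
    splitOnce cs = (findClose cs 0).map (fun j => (cs.take j, cs.drop (j + 1))) := by
  intro cs
  induction cs with
  | nil => simp [splitOnce, findClose]
  | cons c rest ih =>
    by_cases hc : c = ')'
    · simp [splitOnce, findClose, hc]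
    · have shift : ∀ (xs : List Char) (i : Nat), findClose xs i = (findClose xs 0).map (· + i) := by
        intro xs
        induction xs with
        | nil => intro i; simp [findClose]
        | cons x r ihx =>
          intro i
          by_cases hx : x = ')'
          · simp [findClose, hx]
          · simp only [findClose, if_neg hx, ihx (i + 1), ihx 1]
            cases findClose r 0 <;> simp; omega
      simp only [splitOnce, if_neg hc, findClose, ih]
      rw [shift rest 1]
      cases findClose rest 0 <;> simp

lemma rscanOpen_none_iff : ∀ (xs : List Char), rscanOpen xs = none ↔ '(' ∉ xs := by
  intro xs
  induction xs with
  | nil => simp [rscanOpen]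
  | cons c rest ih =>
    by_cases hc : c = '('
    · simp [rscanOpen, hc]
    · simp [rscanOpen, hc, ih, Ne.symm hc]

lemma splitOpen_snd_nil_iff : ∀ (xs : List Char), (splitOpen xs).2 = [] ↔ '(' ∉ xs := by
  intro xs
  induction xs with
  | nil => simp [splitOpen]
  | cons c rest ih =>
    by_cases hc : c = '('
    · simp [splitOpen, hc]
    · simp [splitOpen, hc, ih, Ne.symm hc]

lemma splitOpen_fst_of_no_open : ∀ (xs : List Char), '(' ∉ xs → (splitOpen xs).1 = xs := by
  intro xs
  induction xs with
  | nil => intro _; simp [splitOpen]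
  | cons c rest ih =>
    intro h
    have hc : c ≠ '(' := fun hh => h (hh ▸ List.mem_cons_self)
    have hr : '(' ∉ rest := fun hh => h (List.mem_cons_of_mem _ hh)
    simp [splitOpen, hc, ih hr]

-- The bridge: B's arithmetic on the last '('-segment equals the index of the last '('.
lemma bridge : ∀ (head : List Char),
    (match rscanOpen head.reverse with | some k => (k : Int) | none => -1)
      = (if (splitOpen head).2.isEmpty then -1
         else (head.length : Int) - (((splitOpen head).1 :: (splitOpen head).2).getLastD []).length - 1) := by
  intro head
  induction head with
  | nil => simp [rscanOpen, splitOpen]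
  | cons c rest ih =>
    have hsplit : rscanOpen (c :: rest).reverse = rscanOpen (rest.reverse ++ [c]) := by
      simp
    by_cases hc : c = '('
    · rw [hsplit, rscanOpen_append_single, if_pos hc]
      cases h : rscanOpen rest.reverse with
      | none =>
        have hno : '(' ∉ rest := by
          have := (rscanOpen_none_iff rest.reverse).mp h
          simpa using this
        have h2 : (splitOpen rest).2 = [] := (splitOpen_snd_nil_iff rest).mpr hno
        have h1 : (splitOpen rest).1 = rest := splitOpen_fst_of_no_open rest hno
        simp [splitOpen, hc, h1, h2]
      | some k =>
        have hmem : '(' ∈ rest := by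
          by_contra hno
          have : rscanOpen rest.reverse = none := (rscanOpen_none_iff rest.reverse).mpr (by simpa using hno)
          rw [this] at h; cases h
        have h2 : (splitOpen rest).2 ≠ [] := fun hh => ((splitOpen_snd_nil_iff rest).mp hh) hmem
        rw [h] at ih
        dsimp only at ih
        simp only [splitOpen, if_pos hc]
        have hiseq : ((splitOpen rest).2.isEmpty) = false := by
          cases hq : (splitOpen rest).2 with
          | nil => exact absurd hq h2
          | cons a l => simp
        rw [hiseq] at ih
        simp only [Bool.false_eq_true, if_false] at ih
        simp only [List.isEmpty_cons, if_false, Bool.false_eq_true]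
        have hlast : (([] : List Char) :: (splitOpen rest).1 :: (splitOpen rest).2).getLastD []
            = ((splitOpen rest).1 :: (splitOpen rest).2).getLastD [] := by
          simp
        rw [hlast]
        simp only [List.length_cons]
        push_cast
        rw [ih]; ring
    · rw [hsplit, rscanOpen_append_single, if_neg hc]
      cases h : rscanOpen rest.reverse with
      | none =>
        have hno : '(' ∉ rest := by
          have := (rscanOpen_none_iff rest.reverse).mp h
          simpa using this
        have h2 : (splitOpen rest).2 = [] := (splitOpen_snd_nil_iff rest).mpr hno
        simp [splitOpen, hc, h2]
      | some k =>
        have hmem : '(' ∈ rest := by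
          by_contra hno
          have : rscanOpen rest.reverse = none := (rscanOpen_none_iff rest.reverse).mpr (by simpa using hno)
          rw [this] at h; cases h
        rw [h] at ih
        dsimp only at ih
        simp only [splitOpen, if_neg hc]
        have hiseq : ((splitOpen rest).2.isEmpty) = false := by
          cases hq : (splitOpen rest).2 with
          | nil => exact absurd ((splitOpen_snd_nil_iff rest).mp hq) (by simpa using hmem)
          | cons a l => simp
        rw [hiseq] at ih
        simp only [Bool.false_eq_true, if_false] at ih
        cases hq : (splitOpen rest).2 with
        | nil => rw [hq] at hiseq; simp at hiseq
        | cons a l =>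
          rw [hq] at ih
          simp only [List.isEmpty_cons, Bool.false_eq_true, if_false]
          have hlast : ((c :: (splitOpen rest).1) :: a :: l).getLastD []
              = ((splitOpen rest).1 :: a :: l).getLastD [] := by
            simp
          rw [hlast]
          simp only [List.length_cons, Option.map_some]
          push_cast
          rw [ih]; ring

-- ===== VERDICT (by name: the statement is the Claim_ definition above) =====
theorem findset_spec : Claim_equal_findset := by
  intro line _
  unfold Spec_findset findset findset_alt
  rw [findsetLoop_eq, splitOnce_eq_findClose]
  cases h : findClose line.toList 0 with
  | none => rfl
  | some j =>
    have hj : j < line.toList.length := by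
      have := findClose_lt line.toList 0 j h
      omega
    have hlen : (line.toList.take j).length = j := by
      rw [List.length_take]; omega
    simp only [Option.map_some, Nat.sub_zero, Nat.zero_add]
    have hb := bridge (line.toList.take j)
    have hpair : ∀ (c : Bool) (e y : Int),
        (if c = true then ((-1 : Int), y) else (e, y)) = ((if c = true then -1 else e), y) := by
      intro c e y; cases c <;> rfl
    rw [hpair, hlen]
    refine Prod.ext ?_ rfl
    cases hr : rscanOpen ((line.toList.take j).reverse) with
    | none =>
      rw [hr] at hb
      dsimp only at hb ⊢
      rw [hlen] at hb
      exact hb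
    | some k =>
      rw [hr] at hb
      dsimp only at hb ⊢
      rw [hlen] at hb
      exact hb
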